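-- pv_equiv track=rewrite | github.com/pypi-data/pypi-mirror-31 | packages/sdpl/sdpl-0.7.tar.gz/sdpl-0.7/parser/abstract_lexicon.py | column_list_to_dict
-- ===== SOURCE A (Python) =====
-- from collections import OrderedDict
--
-- def column_list_to_dict(column_names:list):
--     # reformat list [(relation_name, column_name), ..., (relation_name, column_name)] into
--     # dict {relation_name: [column_name, ..., column_name]}
--     join_elements = OrderedDict()
--     for entry in column_names:
--         element_name, entry_column = entry
--         if element_name not in join_elements:
--             join_elements[element_name] = list()
--
--         join_elements[element_name].append(entry_column)
--     return join_elements
-- ===== SOURCE B (Python) =====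
-- from collections import OrderedDict
--
-- def column_list_to_dict(column_names: list):
--     # enumerate the distinct relation names in first-appearance order,
--     # then collect each relation's columns with one filtering pass per relation
--     keys = OrderedDict.fromkeys(r for r, _ in column_names)
--     return OrderedDict((rel, [c for r, c in column_names if r == rel]) for rel in keys)
-- ===== Notes on version B (the rewrite author's own statement) =====
-- stated objective: alternative
-- what changed: Replaces A's single dispatching pass that grows/updates an ordered dict entry per element with a keys-then-filter structure: first dedup the relation names in order, then rescan the list once per relation to collect its columns.
import Mathlib
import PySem

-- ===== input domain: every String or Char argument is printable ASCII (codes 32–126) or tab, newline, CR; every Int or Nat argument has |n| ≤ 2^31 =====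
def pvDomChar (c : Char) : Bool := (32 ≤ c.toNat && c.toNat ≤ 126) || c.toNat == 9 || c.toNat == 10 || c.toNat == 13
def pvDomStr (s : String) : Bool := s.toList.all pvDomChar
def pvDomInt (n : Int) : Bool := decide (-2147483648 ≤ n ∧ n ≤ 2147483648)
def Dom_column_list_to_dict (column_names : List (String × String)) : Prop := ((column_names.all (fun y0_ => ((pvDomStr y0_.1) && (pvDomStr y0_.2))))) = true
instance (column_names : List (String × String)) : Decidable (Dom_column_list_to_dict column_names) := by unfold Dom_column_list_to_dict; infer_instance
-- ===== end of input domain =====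

-- B replaces A's single dispatching pass (ordered dict grown/appended per element) with an
-- ordered dedup of the relation names followed by one filtering rescan per relation (alternative
-- decomposition, same result). Python A/B return an OrderedDict; here it is its item list.

-- ===== PORT A =====
-- A: one pass; if the relation is new, insert an empty list, then append the column to its entry.
def column_list_to_dict (column_names : List (String × String)) : List (String × List String) :=
  (column_names.foldl
    (fun d p =>
      let d' := if d.contains p.1 = false then d.insert p.1 ([] : List String) else d
      d'.modify p.1 [] (fun l => l ++ [p.2]))
    (PySem.Dict.empty : PySem.Dict String (List String))).items

-- ===== PORT B =====
-- B: distinct relation names in first-appearance order, then one filter+map pass per relation.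
def column_list_to_dict_alt (column_names : List (String × String)) : List (String × List String) :=
  (PySem.List.dedup (column_names.map Prod.fst)).map
    (fun rel => (rel, (column_names.filter (fun p => p.1 == rel)).map (·.2)))

-- ===== PRECONDITION & SPEC =====
def Spec_column_list_to_dict (column_names : List (String × String)) (out : List (String × List String)) : Prop := out = column_list_to_dict_alt column_names
instance (column_names : List (String × String)) (out : List (String × List String)) : Decidable (Spec_column_list_to_dict column_names out) := by unfold Spec_column_list_to_dict; infer_instance

-- ===== CLAIM (what is proved, stated in full; the proofs are below) =====
def Claim_equal_column_list_to_dict : Prop := ∀ (column_names : List (String × String)), Dom_column_list_to_dict column_names → Spec_column_list_to_dict column_names (column_list_to_dict column_names)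

-- ===== LEMMAS AND PROOFS =====

-- insert twice at the same key = insert once (overwrite)
theorem insert_insert_self (d : PySem.Dict String (List String)) (k : String)
    (v w : List String) : (d.insert k v).insert k w = d.insert k w := by
  apply PySem.Dict.ext
  by_cases hc : d.contains k = true
  · rw [PySem.Dict.items_insert_of_contains _ w (PySem.Dict.contains_insert_self d k v),
        PySem.Dict.items_insert_of_contains _ v hc,
        PySem.Dict.items_insert_of_contains _ w hc, List.map_map]
    apply List.map_congr_left
    intro p _
    by_cases hp : p.1 = k <;> simp [hp]
  · have hcf : d.contains k = false := by simpa using hc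
    have hall : ∀ p ∈ d.items, ¬ ((p.1 == k) = true) := by
      simpa [PySem.Dict.contains, List.any_eq_false] using hcf
    rw [PySem.Dict.items_insert_of_contains _ w (PySem.Dict.contains_insert_self d k v),
        PySem.Dict.items_insert_of_not_contains _ v hcf,
        PySem.Dict.items_insert_of_not_contains _ w hcf, List.map_append]
    have hid : List.map (fun p => if (p.1 == k) = true then (k, w) else p) d.items
        = d.items := by
      conv_rhs => rw [← List.map_id d.items]
      apply List.map_congr_left
      intro p hp
      simp [hall p hp]
    rw [hid]
    simp

-- A's step (insert-empty-if-new, then append) is extensionally modify-with-default-[].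
theorem stepA_eq_modify (d : PySem.Dict String (List String)) (p : String × String) :
    (let d' := if d.contains p.1 = false then d.insert p.1 ([] : List String) else d
     d'.modify p.1 [] (fun l => l ++ [p.2]))
    = d.modify p.1 [] (fun l => l ++ [p.2]) := by
  by_cases h : d.contains p.1 = false
  · show (if d.contains p.1 = false then d.insert p.1 ([] : List String) else d).modify
        p.1 [] (fun l => l ++ [p.2]) = _
    rw [if_pos h]
    simp only [PySem.Dict.modify, PySem.Dict.getD_insert_self,
      PySem.Dict.getD_of_not_contains _ _ h]
    exact insert_insert_self d p.1 [] ([] ++ [p.2])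
  · show (if d.contains p.1 = false then d.insert p.1 ([] : List String) else d).modify
        p.1 [] (fun l => l ++ [p.2]) = _
    rw [if_neg h]

-- a dict with nodup keys is the map of getD over its keys
theorem items_eq_keys_map (d : PySem.Dict String (List String)) (h : d.keys.Nodup) :
    d.items = d.keys.map (fun k => (k, d.getD k [])) := by
  have hk : d.keys = d.items.map (·.1) := by simp [PySem.Dict.keys]
  rw [hk, List.map_map]
  symm
  conv_rhs => rw [← List.map_id d.items]
  apply List.map_congr_left
  intro p hp
  have hg := PySem.Dict.getD_of_mem_items d (k := p.1) (v := p.2) (by simpa using hp) h ([])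
  simp [Function.comp, hg]

theorem column_list_to_dict_eq_alt (column_names : List (String × String)) :
    column_list_to_dict column_names = column_list_to_dict_alt column_names := by
  unfold column_list_to_dict column_list_to_dict_alt
  have hfold :
      (column_names.foldl
        (fun d p =>
          let d' := if d.contains p.1 = false then d.insert p.1 ([] : List String) else d
          d'.modify p.1 [] (fun l => l ++ [p.2]))
        (PySem.Dict.empty : PySem.Dict String (List String)))
      = column_names.foldl (fun d p => d.modify p.1 [] (fun l => l ++ [p.2]))
          (PySem.Dict.empty : PySem.Dict String (List String)) := by
    congr 1
    funext d p
    exact stepA_eq_modify d p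
  rw [hfold]
  set D := column_names.foldl (fun d p => d.modify p.1 [] (fun l => l ++ [p.2]))
      (PySem.Dict.empty : PySem.Dict String (List String)) with hD
  have hkeys : D.keys = PySem.List.dedup (column_names.map Prod.fst) := by
    rw [hD]
    rw [PySem.Dict.keys_foldl_modify_key (key := Prod.fst)
      (f := fun (d : PySem.Dict String (List String)) (p : String × String) =>
        fun l => l ++ [p.2]) (d0 := ([] : List String))]
    simp [PySem.Dict.keys_empty, PySem.Set.update, PySem.List.dedup_eq_ofList,
      PySem.Set.ofList_eq_foldl]
  have hnodup : D.keys.Nodup := by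
    rw [hkeys]; exact PySem.List.nodup_dedup _
  have hget : ∀ k, D.getD k [] = (column_names.filter (fun p => p.1 == k)).map (·.2) := by
    intro k
    rw [hD, PySem.Dict.getD_foldl_modify_append]
    simp [PySem.Dict.getD_empty]
  rw [items_eq_keys_map D hnodup, hkeys]
  apply List.map_congr_left
  intro rel _
  simp [hget rel]

-- ===== VERDICT (by name: the statement is the Claim_ definition above) =====
theorem column_list_to_dict_spec : Claim_equal_column_list_to_dict := by
  intro cs _
  exact column_list_to_dict_eq_alt cs
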